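-- pv_equiv track=rewrite | github.com/miliar/Code_Jam_Webscraper | solutions_python/Problem_74/586.py | get_steps
-- ===== SOURCE A (Python) =====
-- def get_steps(seq):
--     prev_target=seq[0]
--     handicap=steps=0
--     position={"O":1,"B":1}
--     for s in seq:
--         if s.isnumeric():
--             step=abs(position[target]-int(s))+1
--             position[target]=int(s)
--             if prev_target!=target:
--                 steps+=handicap
--                 handicap=max(1,step-handicap)
--             else:
--                 handicap+=step
--             prev_target=target
--         else:
--             target=s
--     return steps+handicap
-- ===== SOURCE B (Python) =====
-- def get_steps(seq):
--     # Canonical Bot Trust clock simulation: per-robot position and last-press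
--     # time, a global clock advanced by max(ready time, clock) + 1 per press.
--     pos = {"O": 1, "B": 1}
--     last = {"O": 0, "B": 0}
--     cur = 0
--     for s in seq:
--         if s.isnumeric():
--             cur = max(last[target] + abs(pos[target] - int(s)), cur) + 1
--             last[target] = cur
--             pos[target] = int(s)
--         else:
--             target = s
--     return cur
-- ===== Notes on version B (the rewrite author's own statement) =====
-- stated objective: alternative
-- what changed: Replaces A's handicap/steps bookkeeping (a running slack accumulated per robot and flushed on target switches) with the canonical Bot Trust clock simulation: per-robot position and last-press time plus a global clock advanced by max(ready time, clock)+1 per press; the equivalence of the two recurrences is proved by a five-clause invariant.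
-- crash fix: On the empty sequence A raises IndexError (it reads seq[0]); B never reads seq[0] and returns 0 there. (Pre_ also excludes sequences where A raises NameError/KeyError: a numeric token before any target token, or whose most recent target token is not 'O' or 'B' -- B raises there too.) — e.g. on get_steps([]): A raises IndexError, B returns 0
import Mathlib
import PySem

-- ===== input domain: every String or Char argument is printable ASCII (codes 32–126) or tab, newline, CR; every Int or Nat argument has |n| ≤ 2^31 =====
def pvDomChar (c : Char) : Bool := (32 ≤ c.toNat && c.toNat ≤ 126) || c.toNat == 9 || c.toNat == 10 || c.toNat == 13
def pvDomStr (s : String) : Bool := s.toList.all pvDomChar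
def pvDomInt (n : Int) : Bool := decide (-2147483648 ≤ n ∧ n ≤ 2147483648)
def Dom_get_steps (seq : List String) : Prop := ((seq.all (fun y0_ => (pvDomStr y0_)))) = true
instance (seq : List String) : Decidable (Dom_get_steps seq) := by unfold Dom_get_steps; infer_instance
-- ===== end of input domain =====

-- B replaces A's handicap/steps bookkeeping with the canonical Bot Trust clock simulation
-- (per-robot last-press time + global clock); same O(n) cost, different recurrence.

-- ===== PORT A =====
def pvInitPos : PySem.Dict String Int := PySem.Dict.ofList [("O", 1), ("B", 1)]

-- loop body of A; state = (prev_target, handicap, steps, position, target).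
-- `target` before its first assignment is modelled as "" (Python raises NameError there;
-- excluded by Pre_), and position[target] as getD (KeyError, excluded by Pre_).
-- s.isnumeric() is ported as strIsdigit, exact on the ASCII domain.
def pvStepA (acc : String × Int × Int × PySem.Dict String Int × String) (s : String) :
    String × Int × Int × PySem.Dict String Int × String :=
  match acc with
  | (prev, h, st, pos, tgt) =>
    if PySem.Str.strIsdigit s then
      let v := (PySem.Int.ofStr? s).getD 0
      let step := |pos.getD tgt 0 - v| + 1
      let pos' := pos.insert tgt v
      if prev ≠ tgt then (tgt, max 1 (step - h), st + h, pos', tgt)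
      else (tgt, h + step, st, pos', tgt)
    else (prev, h, st, pos, s)

def get_steps (seq : List String) : Int :=
  let prev := (PySem.List.pyGet? seq 0).getD ""   -- seq[0]; seq = [] raises IndexError, excluded by Pre_
  let r := seq.foldl pvStepA (prev, (0 : Int), (0 : Int), pvInitPos, "")
  r.2.2.1 + r.2.1

-- ===== PORT B =====
def pvInitLast : PySem.Dict String Int := PySem.Dict.ofList [("O", 0), ("B", 0)]

-- loop body of B; state = (pos, last, cur, target); same modelling conventions as A's port.
def pvStepB (acc : PySem.Dict String Int × PySem.Dict String Int × Int × String) (s : String) :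
    PySem.Dict String Int × PySem.Dict String Int × Int × String :=
  match acc with
  | (pos, last, cur, tgt) =>
    if PySem.Str.strIsdigit s then
      let v := (PySem.Int.ofStr? s).getD 0
      let cur' := max (last.getD tgt 0 + |pos.getD tgt 0 - v|) cur + 1
      (pos.insert tgt v, last.insert tgt cur', cur', tgt)
    else (pos, last, cur, s)

def get_steps_alt (seq : List String) : Int :=
  (seq.foldl pvStepB (pvInitPos, pvInitLast, (0 : Int), "")).2.2.1

-- ===== PRECONDITION & SPEC =====
-- pvOk seq t: walking seq with current target t, every numeric token's current target is "O" or "B"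
def pvOk : List String → String → Bool
  | [], _ => true
  | s :: r, t => if PySem.Str.strIsdigit s then ((t == "O") || (t == "B")) && pvOk r t else pvOk r s

-- Pre_ excludes exactly the inputs where A raises: [] (IndexError on seq[0]); a numeric token
-- before any target token (NameError); a numeric token whose current target is not "O"/"B" (KeyError).
def Pre_get_steps (seq : List String) : Prop := seq ≠ [] ∧ pvOk seq "" = true
instance (seq : List String) : Decidable (Pre_get_steps seq) := by unfold Pre_get_steps; infer_instance

def pvWitness_get_steps : List String := ["O", "2", "B", "1", "B", "4", "O", "3"]

-- On the empty sequence A raises IndexError (it reads seq[0]); B never reads seq[0] and returns 0.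
def Raises_get_steps (seq : List String) : Prop := seq = []
instance (seq : List String) : Decidable (Raises_get_steps seq) := by unfold Raises_get_steps; infer_instance
def pvRaiseWitness_get_steps : List String := []
def pvRaiseWitnessOut_get_steps : Int := 0

def Spec_get_steps (seq : List String) (out : Int) : Prop := out = get_steps_alt seq
instance (seq : List String) (out : Int) : Decidable (Spec_get_steps seq out) := by unfold Spec_get_steps; infer_instance

-- ===== CLAIM (what is proved, stated in full; the proofs are below) =====
def Claim_equal_get_steps : Prop := ∀ (seq : List String), Dom_get_steps seq → Pre_get_steps seq → Spec_get_steps seq (get_steps seq)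

def Claim_raises_get_steps : Prop := (∀ (seq : List String), Dom_get_steps seq → Raises_get_steps seq → ¬ Pre_get_steps seq) ∧ (Dom_get_steps (pvRaiseWitness_get_steps) ∧ Raises_get_steps (pvRaiseWitness_get_steps) ∧ get_steps_alt (pvRaiseWitness_get_steps) = pvRaiseWitnessOut_get_steps)

-- ===== LEMMAS AND PROOFS =====

-- The invariant tying A's (prev, handicap, steps) to B's (last, cur):
-- steps+handicap = cur; the last-pressed robot's time is cur; for each other robot r,
-- handicap = cur - last[r]; and before any press (prev not a robot) the B-state is still initial.
def pvRel (prev : String) (h st : Int) (last : PySem.Dict String Int) (cur : Int) : Prop :=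
  st + h = cur ∧ last.getD prev 0 = cur ∧
  ("O" ≠ prev → h = cur - last.getD "O" 0) ∧
  ("B" ≠ prev → h = cur - last.getD "B" 0) ∧
  (prev = "O" ∨ prev = "B" ∨ (last = pvInitLast ∧ cur = 0))

theorem pvInitLast_getD (p : String) : pvInitLast.getD p 0 = 0 := by
  show ((PySem.Dict.empty.insert "O" (0 : Int)).insert "B" 0).getD p 0 = 0
  simp only [PySem.Dict.getD_insert, PySem.Dict.getD_empty]
  split_ifs <;> rfl

theorem pvPress_core (prev tgt oth : String) (h st cur d : Int)
    (last : PySem.Dict String Int) (hto : tgt ≠ oth)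
    (h1 : st + h = cur) (h2 : last.getD prev 0 = cur)
    (hT : tgt ≠ prev → h = cur - last.getD tgt 0)
    (hO : oth ≠ prev → h = cur - last.getD oth 0)
    (h5 : prev = tgt ∨ prev = oth ∨ (last = pvInitLast ∧ cur = 0)) (hd : 0 ≤ d) :
    ((if prev ≠ tgt then st + h else st) + (if prev ≠ tgt then max 1 ((d + 1) - h) else h + (d + 1))
        = max (last.getD tgt 0 + d) cur + 1)
    ∧ (if prev ≠ tgt then max 1 ((d + 1) - h) else h + (d + 1))
        = (max (last.getD tgt 0 + d) cur + 1) - last.getD oth 0 := by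
  by_cases hpt : prev = tgt
  · have hh := hO (fun e => hto (hpt ▸ e.symm))
    rw [if_neg (fun hc => hc hpt), if_neg (fun hc => hc hpt)]
    rw [hpt] at h2
    rcases max_cases (last.getD tgt 0 + d) cur with ⟨e1, _⟩ | ⟨e1, _⟩ <;>
      exact ⟨by omega, by omega⟩
  · have hT' := hT (fun e => hpt e.symm)
    rw [if_pos hpt, if_pos hpt]
    by_cases hpo : prev = oth
    · rw [hpo] at h2
      rcases max_cases (last.getD tgt 0 + d) cur with ⟨e1, _⟩ | ⟨e1, _⟩ <;>
        rcases max_cases 1 ((d + 1) - h) with ⟨e2, _⟩ | ⟨e2, _⟩ <;>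
          exact ⟨by omega, by omega⟩
    · obtain ⟨hl, hc⟩ := (h5.resolve_left hpt).resolve_left hpo
      have eT : last.getD tgt 0 = 0 := by rw [hl]; exact pvInitLast_getD _
      have eO : last.getD oth 0 = 0 := by rw [hl]; exact pvInitLast_getD _
      rcases max_cases (last.getD tgt 0 + d) cur with ⟨e1, _⟩ | ⟨e1, _⟩ <;>
        rcases max_cases 1 ((d + 1) - h) with ⟨e2, _⟩ | ⟨e2, _⟩ <;>
          exact ⟨by omega, by omega⟩

theorem pvRel_press (prev tgt : String) (h st cur d : Int) (last : PySem.Dict String Int)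
    (hrel : pvRel prev h st last cur) (ht : tgt = "O" ∨ tgt = "B") (hd : 0 ≤ d) :
    pvRel tgt (if prev ≠ tgt then max 1 ((d + 1) - h) else h + (d + 1))
          (if prev ≠ tgt then st + h else st)
          (last.insert tgt (max (last.getD tgt 0 + d) cur + 1))
          (max (last.getD tgt 0 + d) cur + 1) := by
  obtain ⟨h1, h2, h3, h4, h5⟩ := hrel
  rcases ht with h' | h'
  · subst h'
    obtain ⟨c1, c3⟩ := pvPress_core prev "O" "B" h st cur d last (by decide) h1 h2 h3 h4 h5 hd
    refine ⟨c1, PySem.Dict.getD_insert_self _ _ _ _, fun hh => absurd rfl hh, fun hne => ?_, Or.inl rfl⟩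
    rw [PySem.Dict.getD_insert, if_neg hne]
    exact c3
  · subst h'
    obtain ⟨c1, c3⟩ := pvPress_core prev "B" "O" h st cur d last (by decide) h1 h2 h4 h3
      (by tauto) hd
    refine ⟨c1, PySem.Dict.getD_insert_self _ _ _ _, fun hne => ?_, fun hh => absurd rfl hh, Or.inr (Or.inl rfl)⟩
    rw [PySem.Dict.getD_insert, if_neg hne]
    exact c3

theorem pvMain (seq : List String) : ∀ (prev : String) (h st : Int)
    (pos last : PySem.Dict String Int) (cur : Int) (tgt : String),
    pvRel prev h st last cur → pvOk seq tgt = true →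
    (seq.foldl pvStepA (prev, h, st, pos, tgt)).2.2.1 + (seq.foldl pvStepA (prev, h, st, pos, tgt)).2.1
      = (seq.foldl pvStepB (pos, last, cur, tgt)).2.2.1 := by
  induction seq with
  | nil => intro prev h st pos last cur tgt hrel _; exact hrel.1
  | cons s rest ih =>
    intro prev h st pos last cur tgt hrel hok
    by_cases hs : PySem.Str.strIsdigit s = true
    · unfold pvOk at hok
      rw [if_pos hs] at hok
      simp only [Bool.and_eq_true, Bool.or_eq_true, beq_iff_eq] at hok
      obtain ⟨ht, hok'⟩ := hok
      have hrel' := pvRel_press prev tgt h st cur (|pos.getD tgt 0 - (PySem.Int.ofStr? s).getD 0|)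
        last hrel ht (abs_nonneg _)
      simp only [List.foldl_cons, pvStepA, pvStepB, if_pos hs]
      by_cases hpt : prev ≠ tgt
      · simp only [if_pos hpt]
        refine ih _ _ _ _ _ _ _ ?_ hok'
        simpa only [if_pos hpt] using hrel'
      · simp only [if_neg hpt]
        refine ih _ _ _ _ _ _ _ ?_ hok'
        simpa only [if_neg hpt] using hrel'
    · unfold pvOk at hok
      rw [if_neg hs] at hok
      simp only [List.foldl_cons, pvStepA, pvStepB, if_neg hs]
      exact ih _ _ _ _ _ _ _ hrel hok

-- ===== VERDICT (by name: the statement is the Claim_ definition above) =====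
theorem get_steps_spec : Claim_equal_get_steps := by
  intro seq _ hpre
  unfold Spec_get_steps get_steps get_steps_alt
  refine pvMain seq _ 0 0 pvInitPos pvInitLast 0 "" ?_ hpre.2
  refine ⟨rfl, pvInitLast_getD _, ?_, ?_, Or.inr (Or.inr ⟨rfl, rfl⟩)⟩ <;>
    intro _ <;> simp [pvInitLast_getD]

theorem get_steps_raises : Claim_raises_get_steps := by
  unfold Claim_raises_get_steps
  exact ⟨fun seq _ hr hp => hp.1 hr, by decide⟩

-- self-check that the crash-fix witness is as advertised: A raises on [] and B returns 0 there
theorem pvRaiseWitness_ok : Raises_get_steps pvRaiseWitness_get_steps ∧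
    get_steps_alt pvRaiseWitness_get_steps = pvRaiseWitnessOut_get_steps :=
  ⟨get_steps_raises.2.2.1, get_steps_raises.2.2.2⟩
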